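-- pv_equiv track=rewrite | github.com/yygs321/- | level1_14.py | solution
-- ===== SOURCE A (Python) =====
-- def solution(d, budget):
--     result=0
--     while d:
--         m=min(d)
--         if budget<m:
--             break
--         d.remove(m)
--         budget-=m
--         result+=1
--
--     return result
-- ===== SOURCE B (Python) =====
-- def solution(d, budget):
--     # Sort once ascending, then take items greedily in one pass.
--     # (A mutates d in place by removing elements; B leaves d untouched --
--     # the equivalence is about the return value.)
--     count = 0
--     for x in sorted(d):
--         if budget < x:
--             break
--         budget -= x
--         count += 1
--     return count
-- ===== Notes on version B (the rewrite author's own statement) =====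
-- stated objective: faster
-- what changed: B sorts the list once and accumulates in a single pass instead of repeatedly scanning for the minimum and removing it from the list; B also does not mutate d.
import Mathlib
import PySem

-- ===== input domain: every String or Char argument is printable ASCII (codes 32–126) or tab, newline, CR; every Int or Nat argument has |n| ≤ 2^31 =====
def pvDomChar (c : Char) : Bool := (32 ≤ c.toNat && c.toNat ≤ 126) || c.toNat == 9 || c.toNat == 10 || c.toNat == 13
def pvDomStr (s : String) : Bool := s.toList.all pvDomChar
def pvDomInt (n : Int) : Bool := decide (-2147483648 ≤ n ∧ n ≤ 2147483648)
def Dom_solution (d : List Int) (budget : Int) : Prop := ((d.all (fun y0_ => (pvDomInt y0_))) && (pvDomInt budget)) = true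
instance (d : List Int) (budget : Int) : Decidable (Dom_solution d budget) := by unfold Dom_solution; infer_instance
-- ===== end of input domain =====

-- B sorts once and accumulates in one pass instead of A's repeated min-scan-and-remove;
-- A mutates d in place (removes elements), B does not — the equivalence is about the return value.

-- ===== PORT A =====
-- the 'while d:' loop: m = min(d); break if budget < m; d.remove(m); budget -= m; result += 1
def solLoopA : List Int → Int → Int → Int
  | [], _, result => result
  | x :: t, budget, result =>
    let m := List.foldl min x t   -- min(d) on the nonempty list (PySem.List.min?_id_cons)
    if budget < m then result
    else solLoopA ((PySem.List.remove? (x :: t) m).getD []) (budget - m) (result + 1)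
termination_by d => d.length
decreasing_by
  rw [List.foldl_attach]
  have hmem : (List.foldl min x t) ∈ x :: t := by
    rcases PySem.List.foldl_min_mem t x with h | h
    · rw [h]; exact List.mem_cons_self
    · exact List.mem_cons_of_mem x h
  simp [PySem.List.remove?_eq_some_erase _ _ hmem, List.length_erase_of_mem hmem]

def solution (d : List Int) (budget : Int) : Int := solLoopA d budget 0

-- ===== PORT B =====
-- 'for x in sorted(d): if budget < x: break; budget -= x; count += 1'
def solLoopB : List Int → Int → Int → Int
  | [], _, count => count
  | x :: t, budget, count =>
    if budget < x then count
    else solLoopB t (budget - x) (count + 1)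

def solution_alt (d : List Int) (budget : Int) : Int :=
  solLoopB (PySem.List.sorted d (fun y => y) false) budget 0

-- ===== PRECONDITION & SPEC =====
def Spec_solution (d : List Int) (budget : Int) (out : Int) : Prop := out = solution_alt d budget
instance (d : List Int) (budget : Int) (out : Int) : Decidable (Spec_solution d budget out) := by unfold Spec_solution; infer_instance

-- ===== CLAIM (what is proved, stated in full; the proofs are below) =====
def Claim_equal_solution : Prop := ∀ (d : List Int) (budget : Int), Dom_solution d budget → Spec_solution d budget (solution d budget)

-- ===== LEMMAS AND PROOFS =====

theorem min_mem_cons (x : Int) (t : List Int) : (List.foldl min x t) ∈ x :: t := by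
  rcases PySem.List.foldl_min_mem t x with h | h
  · rw [h]; exact List.mem_cons_self
  · exact List.mem_cons_of_mem x h

-- the head of sorted(x::t) is min(x::t), and its tail is the sort of the list with
-- that (first) minimum removed
theorem sorted_cons_min (x : Int) (t : List Int) :
    PySem.List.sorted (x :: t) (fun y => y) false =
      (List.foldl min x t) :: PySem.List.sorted ((x :: t).erase (List.foldl min x t)) (fun y => y) false := by
  have hmem := min_mem_cons x t
  apply PySem.List.eq_of_perm_of_pairwise_le_of_injective (fun y => y) (fun _ _ h => h)
  · exact (PySem.List.sorted_perm _ _ _).trans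
      ((List.perm_cons_erase hmem).trans
        (List.Perm.cons _ (PySem.List.sorted_perm _ _ _).symm))
  · exact PySem.List.sorted_pairwise _ _
  · refine List.Pairwise.cons ?_ (PySem.List.sorted_pairwise _ _)
    intro y hy
    have hy' : y ∈ x :: t :=
      (List.erase_subset) ((PySem.List.mem_sorted _ _ _ _).1 hy)
    rcases List.mem_cons.1 hy' with rfl | h
    · exact (PySem.List.foldl_min_le t y).1
    · exact (PySem.List.foldl_min_le t x).2 y h

theorem loop_eq (n : Nat) : ∀ (d : List Int), d.length ≤ n → ∀ (budget result : Int),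
    solLoopA d budget result = solLoopB (PySem.List.sorted d (fun y => y) false) budget result := by
  induction n with
  | zero =>
    intro d hd budget result
    have : d = [] := List.eq_nil_of_length_eq_zero (Nat.le_zero.1 hd)
    subst this
    rw [solLoopA.eq_def]; simp [solLoopB, PySem.List.sorted]
  | succ n ih =>
    intro d hd budget result
    match d with
    | [] => rw [solLoopA.eq_def]; simp [solLoopB, PySem.List.sorted]
    | x :: t =>
      rw [sorted_cons_min]
      have hmem := min_mem_cons x t
      rw [solLoopA.eq_def]; simp only [solLoopB]
      split
      · rfl
      · rw [PySem.List.remove?_eq_some_erase _ _ hmem]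
        simp only [Option.getD_some]
        exact ih ((x :: t).erase (List.foldl min x t))
          (by have := List.length_erase_of_mem hmem; simp at hd this ⊢; omega)
          (budget - List.foldl min x t) (result + 1)

-- ===== VERDICT (by name: the statement is the Claim_ definition above) =====
theorem solution_spec : Claim_equal_solution := by
  intro d budget _
  unfold Spec_solution solution solution_alt
  exact loop_eq d.length d (le_refl _) budget 0
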